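-- pv_equiv track=rewrite | github.com/taogya/LocalLLMBenchmark | scripts/traceability/_common.py | in_fenced_code_blocks
-- ===== SOURCE A (Python) =====
-- def in_fenced_code_blocks(lines: list[str]) -> list[bool]:
--     """各行がコードフェンス内かどうかを返す。"""
--     flags = [False] * len(lines)
--     in_block = False
--     for i, line in enumerate(lines):
--         s = line.lstrip()
--         if s.startswith("```") or s.startswith("~~~"):
--             in_block = not in_block
--             flags[i] = True  # フェンス行自体は内側扱い
--             continue
--         flags[i] = in_block
--     return flags
-- ===== SOURCE B (Python) =====
-- def _find_fence(lines, start):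
--     for k in range(start, len(lines)):
--         s = lines[k].lstrip()
--         if s.startswith("```") or s.startswith("~~~"):
--             return k
--     return None
--
--
-- def in_fenced_code_blocks(lines: list[str]) -> list[bool]:
--     """各行がコードフェンス内かどうかを返す。"""
--     flags = []
--     pos = 0
--     n = len(lines)
--     while True:
--         i = _find_fence(lines, pos)
--         if i is None:
--             flags.extend([False] * (n - pos))
--             return flags
--         j = _find_fence(lines, i + 1)
--         if j is None:
--             flags.extend([False] * (i - pos))
--             flags.extend([True] * (n - i))
--             return flags
--         flags.extend([False] * (i - pos))
--         flags.extend([True] * (j - i + 1))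
--         pos = j + 1
-- ===== Notes on version B (the rewrite author's own statement) =====
-- stated objective: alternative
-- what changed: Replaces the per-line toggle-state loop by a segment-jumping scan: repeatedly locate the next opening and closing fence lines and emit a whole block of False flags followed by a whole block of True flags per fence pair, instead of updating an in_block flag line by line.
import Mathlib
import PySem

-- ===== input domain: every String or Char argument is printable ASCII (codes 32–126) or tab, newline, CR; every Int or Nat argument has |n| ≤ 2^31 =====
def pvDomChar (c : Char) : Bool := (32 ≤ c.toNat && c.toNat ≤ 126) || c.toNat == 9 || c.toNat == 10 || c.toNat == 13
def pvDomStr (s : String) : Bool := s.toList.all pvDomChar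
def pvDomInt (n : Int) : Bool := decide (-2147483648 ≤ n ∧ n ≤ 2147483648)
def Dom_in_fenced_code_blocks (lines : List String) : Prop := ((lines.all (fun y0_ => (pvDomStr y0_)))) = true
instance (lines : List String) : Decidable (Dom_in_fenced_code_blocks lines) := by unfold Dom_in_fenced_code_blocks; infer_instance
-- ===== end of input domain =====

-- B replaces A's per-line toggle loop by a segment-jumping scan that finds each fence pair and emits whole False/True blocks (alternative decomposition, same cost).

-- ===== PORT A =====
-- the loop over enumerate(lines), carrying in_block; flags built positionally
def pvLoopA (inb : Bool) (lines : List String) : List Bool :=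
  match lines with
  | [] => []
  | l :: ls =>
    let s := PySem.Str.lstrip l
    if PySem.Str.startswith s "```" || PySem.Str.startswith s "~~~" then
      true :: pvLoopA (!inb) ls
    else
      inb :: pvLoopA inb ls

def in_fenced_code_blocks (lines : List String) : List Bool := pvLoopA false lines

-- ===== PORT B =====
-- _find_fence's scan 'for k in range(start, len(lines))': walk the suffix carrying the absolute index k
def pvFindAux (k : Nat) (suffix : List String) : Option Nat :=
  match suffix with
  | [] => none
  | l :: ls =>
    if PySem.Str.startswith (PySem.Str.lstrip l) "```"
       || PySem.Str.startswith (PySem.Str.lstrip l) "~~~" then some k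
    else pvFindAux (k + 1) ls

-- _find_fence(lines, start): index of the first fence line at or after start, else None
def pvFindFence (lines : List String) (start : Nat) : Option Nat :=
  pvFindAux start (lines.drop start)

-- the while loop, carrying pos and the accumulated flags; fuel bounds the iterations (each jump moves pos forward)
def pvLoopB (lines : List String) (fuel pos : Nat) (flags : List Bool) : List Bool :=
  match fuel with
  | 0 => flags
  | fuel + 1 =>
    match pvFindFence lines pos with
    | none => flags ++ List.replicate (lines.length - pos) false
    | some i =>
      match pvFindFence lines (i + 1) with
      | none => flags ++ List.replicate (i - pos) false ++ List.replicate (lines.length - i) true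
      | some j =>
        pvLoopB lines fuel (j + 1) (flags ++ List.replicate (i - pos) false ++ List.replicate (j - i + 1) true)

def in_fenced_code_blocks_alt (lines : List String) : List Bool :=
  pvLoopB lines (lines.length + 1) 0 []

-- ===== PRECONDITION & SPEC =====
def Spec_in_fenced_code_blocks (lines : List String) (out : List Bool) : Prop := out = in_fenced_code_blocks_alt lines
instance (lines : List String) (out : List Bool) : Decidable (Spec_in_fenced_code_blocks lines out) := by unfold Spec_in_fenced_code_blocks; infer_instance

-- ===== CLAIM (what is proved, stated in full; the proofs are below) =====
def Claim_equal_in_fenced_code_blocks : Prop := ∀ (lines : List String), Dom_in_fenced_code_blocks lines → Spec_in_fenced_code_blocks lines (in_fenced_code_blocks lines)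

-- ===== LEMMAS AND PROOFS =====

def pvIsFence (l : String) : Bool :=
  PySem.Str.startswith (PySem.Str.lstrip l) "```" || PySem.Str.startswith (PySem.Str.lstrip l) "~~~"

theorem pvLoopA_cons (b : Bool) (l : String) (ls : List String) :
    pvLoopA b (l :: ls) = if pvIsFence l then true :: pvLoopA (!b) ls else b :: pvLoopA b ls := by
  simp only [pvLoopA, pvIsFence]
  rfl

theorem pvFindAux_cons (k : Nat) (l : String) (ls : List String) :
    pvFindAux k (l :: ls) = if pvIsFence l then some k else pvFindAux (k + 1) ls := by
  simp only [pvFindAux, pvIsFence]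
  rfl

-- no fence in the suffix: A's loop keeps the state b throughout
theorem pvFindAux_none (ls : List String) : ∀ k, pvFindAux k ls = none →
    ∀ b, pvLoopA b ls = List.replicate ls.length b := by
  induction ls with
  | nil => intro k _ b; rfl
  | cons l ls ih =>
    intro k hn b
    rw [pvFindAux_cons] at hn
    by_cases hf : pvIsFence l = true
    · rw [if_pos hf] at hn; cases hn
    · rw [if_neg hf] at hn
      rw [pvLoopA_cons, if_neg hf, ih (k + 1) hn b, List.length_cons, List.replicate_succ]

-- first fence of the suffix is at absolute index i: b's flags up to it, a toggle there, then the rest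
theorem pvFindAux_some (ls : List String) : ∀ k i, pvFindAux k ls = some i →
    k ≤ i ∧ i - k < ls.length ∧ ∀ b, pvLoopA b ls =
      List.replicate (i - k) b ++ true :: pvLoopA (!b) (ls.drop (i - k + 1)) := by
  induction ls with
  | nil => intro k i hi; cases hi
  | cons l ls ih =>
    intro k i hi
    rw [pvFindAux_cons] at hi
    by_cases hf : pvIsFence l = true
    · rw [if_pos hf] at hi
      cases hi
      refine ⟨le_rfl, by simp, ?_⟩
      intro b
      rw [pvLoopA_cons, if_pos hf]
      simp
    · rw [if_neg hf] at hi
      obtain ⟨hki, hlen, hres⟩ := ih (k + 1) i hi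
      refine ⟨by omega, by simp; omega, ?_⟩
      intro b
      rw [pvLoopA_cons, if_neg hf, hres b]
      have h1 : i - k = (i - (k + 1)) + 1 := by omega
      rw [h1, List.replicate_succ, List.drop_succ_cons]
      simp

theorem pvConsReplicate {α : Type} (a : α) (k : Nat) (X : List α) :
    a :: (List.replicate k a ++ X) = List.replicate k a ++ a :: X := by
  induction k with
  | zero => rfl
  | succ k ih => simp [List.replicate_succ, ih]

-- main invariant: with enough fuel, the while loop produces flags ++ A's flags for the remaining suffix
theorem pvLoopB_eq (lines : List String) : ∀ fuel pos flags, lines.length - pos < fuel →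
    pvLoopB lines fuel pos flags = flags ++ pvLoopA false (lines.drop pos) := by
  intro fuel
  induction fuel with
  | zero => intro pos flags hk; omega
  | succ fuel ih =>
    intro pos flags hk
    show (match pvFindFence lines pos with
      | none => flags ++ List.replicate (lines.length - pos) false
      | some i =>
        match pvFindFence lines (i + 1) with
        | none => flags ++ List.replicate (i - pos) false ++ List.replicate (lines.length - i) true
        | some j =>
          pvLoopB lines fuel (j + 1) (flags ++ List.replicate (i - pos) false ++ List.replicate (j - i + 1) true))
      = flags ++ pvLoopA false (lines.drop pos)
    cases hi : pvFindFence lines pos with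
    | none =>
      show flags ++ List.replicate (lines.length - pos) false = flags ++ pvLoopA false (lines.drop pos)
      rw [pvFindAux_none (lines.drop pos) pos hi false, List.length_drop]
    | some i =>
      show (match pvFindFence lines (i + 1) with
        | none => flags ++ List.replicate (i - pos) false ++ List.replicate (lines.length - i) true
        | some j =>
          pvLoopB lines fuel (j + 1)
            (flags ++ List.replicate (i - pos) false ++ List.replicate (j - i + 1) true))
        = flags ++ pvLoopA false (lines.drop pos)
      obtain ⟨hpi, hilen, hres⟩ := pvFindAux_some (lines.drop pos) pos i hi
      rw [List.length_drop] at hilen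
      have hdrop1 : (lines.drop pos).drop (i - pos + 1) = lines.drop (i + 1) := by
        rw [List.drop_drop]
        congr 1
        omega
      cases hj : pvFindFence lines (i + 1) with
      | none =>
        show flags ++ List.replicate (i - pos) false ++ List.replicate (lines.length - i) true
            = flags ++ pvLoopA false (lines.drop pos)
        rw [hres false, Bool.not_false, hdrop1,
            pvFindAux_none (lines.drop (i + 1)) (i + 1) hj true, List.length_drop]
        have hlen : lines.length - i = (lines.length - (i + 1)) + 1 := by omega
        rw [hlen, List.replicate_succ]
        simp
      | some j =>
        show pvLoopB lines fuel (j + 1)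
              (flags ++ List.replicate (i - pos) false ++ List.replicate (j - i + 1) true)
            = flags ++ pvLoopA false (lines.drop pos)
        obtain ⟨hij, hjlen, hres2⟩ := pvFindAux_some (lines.drop (i + 1)) (i + 1) j hj
        rw [List.length_drop] at hjlen
        have hdrop2 : (lines.drop (i + 1)).drop (j - (i + 1) + 1) = lines.drop (j + 1) := by
          rw [List.drop_drop]
          congr 1
          omega
        rw [ih (j + 1) _ (by omega), hres false, Bool.not_false, hdrop1, hres2 true,
            Bool.not_true, hdrop2]
        have hlen : j - i + 1 = (j - (i + 1)) + 1 + 1 := by omega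
        rw [hlen, List.replicate_succ, List.replicate_succ]
        simp
        exact pvConsReplicate true (j - (i + 1)) _

-- ===== VERDICT (by name: the statement is the Claim_ definition above) =====
theorem in_fenced_code_blocks_spec : Claim_equal_in_fenced_code_blocks := by
  intro lines _
  unfold Spec_in_fenced_code_blocks in_fenced_code_blocks in_fenced_code_blocks_alt
  rw [pvLoopB_eq lines (lines.length + 1) 0 [] (by omega)]
  simp
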